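-- pv_equiv track=rewrite | github.com/Eyalnir7/GittinsSearch | GittinsSearchLGP/Learning/test_compile/script_model.py | _parse_task_and_node_type
-- ===== SOURCE A (Python) =====
-- def _parse_task_and_node_type(base_name):
--     """Extract (task_name, node_type) from an artifact base name like
--     'FEASIBILITY_WAYPOINTS_p0.2_randomBlocks_all' or
--     'QUANTILE_REGRESSION_FEAS_LGP_p0.8_randomBlocks_all'.
--     Returns (None, None) if parsing fails.
--     """
--     task_names = [
--         "QUANTILE_REGRESSION_FEAS",
--         "QUANTILE_REGRESSION_INFEAS",
--         "FEASIBILITY",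
--     ]
--     node_types = ["WAYPOINTS", "RRT", "LGP"]
--
--     for task in task_names:
--         if base_name.upper().startswith(task + "_"):
--             remainder = base_name[len(task) + 1:]
--             for node in node_types:
--                 if remainder.upper().startswith(node + "_") or remainder.upper() == node:
--                     return task, node
--     return None, None
-- ===== SOURCE B (Python) =====
-- def _parse_task_and_node_type(base_name):
--     """Tokenize the uppercased name on underscores and recognise the task by
--     its leading tokens, then the node as the next whole token."""
--     parts = base_name.upper().split("_")
--     if parts[:3] == ["QUANTILE", "REGRESSION", "FEAS"]:
--         task, idx = "QUANTILE_REGRESSION_FEAS", 3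
--     elif parts[:3] == ["QUANTILE", "REGRESSION", "INFEAS"]:
--         task, idx = "QUANTILE_REGRESSION_INFEAS", 3
--     elif parts[0] == "FEASIBILITY":
--         task, idx = "FEASIBILITY", 1
--     else:
--         return None, None
--     if idx < len(parts) and parts[idx] in ("WAYPOINTS", "RRT", "LGP"):
--         return task, parts[idx]
--     return None, None
-- ===== Notes on version B (the rewrite author's own statement) =====
-- stated objective: alternative
-- what changed: B splits the uppercased name into underscore-separated tokens once and recognises the task by its leading tokens and the node as the following whole token, instead of A's nested loops of repeated .upper() prefix tests and slicing.
import Mathlib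
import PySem

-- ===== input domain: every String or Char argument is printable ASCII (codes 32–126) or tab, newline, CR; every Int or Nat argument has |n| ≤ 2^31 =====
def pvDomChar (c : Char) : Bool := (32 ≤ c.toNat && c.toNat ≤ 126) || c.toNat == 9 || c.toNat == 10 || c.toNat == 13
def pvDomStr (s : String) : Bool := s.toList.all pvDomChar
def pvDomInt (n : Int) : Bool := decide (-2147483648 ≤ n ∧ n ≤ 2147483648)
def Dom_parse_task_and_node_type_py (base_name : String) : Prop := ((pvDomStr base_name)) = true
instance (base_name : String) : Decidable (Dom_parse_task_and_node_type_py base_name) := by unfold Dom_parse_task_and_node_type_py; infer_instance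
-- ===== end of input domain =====

-- B tokenizes the uppercased name on '_' and recognises task and node by whole tokens,
-- replacing A's nested prefix-scan loops (objective: alternative decomposition, same cost).

-- ===== PORT A =====
def pvTasksA : List String :=
  ["QUANTILE_REGRESSION_FEAS", "QUANTILE_REGRESSION_INFEAS", "FEASIBILITY"]

def pvNodesA : List String := ["WAYPOINTS", "RRT", "LGP"]

-- inner 'for node in node_types' loop
def pvNodeLoopA (remainder : List Char) : List String → Option String
  | [] => none
  | n :: rest =>
    if PySem.Chars.startswith (PySem.Chars.upper remainder) (n.toList ++ ['_'])
        || (PySem.Chars.upper remainder == n.toList) then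
      some n
    else pvNodeLoopA remainder rest

-- outer 'for task in task_names' loop
def pvTaskLoopA (base : List Char) : List String → Option String × Option String
  | [] => (none, none)
  | t :: rest =>
    if PySem.Chars.startswith (PySem.Chars.upper base) (t.toList ++ ['_']) then
      match pvNodeLoopA (PySem.Chars.slice base (some ((PySem.Chars.len t.toList : Int) + 1)) none) pvNodesA with
      | some n => (some t, some n)
      | none => pvTaskLoopA base rest
    else pvTaskLoopA base rest

def parse_task_and_node_type_py (base_name : String) : Option String × Option String :=
  pvTaskLoopA base_name.toList pvTasksA

-- ===== PORT B =====
-- 'idx < len(parts) and parts[idx] in ("WAYPOINTS","RRT","LGP")' on tail = parts[idx:]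
def pvFinishB (task : String) (tail : List (List Char)) : Option String × Option String :=
  match tail with
  | n :: _ =>
    if n == "WAYPOINTS".toList || n == "RRT".toList || n == "LGP".toList then
      (some task, some (String.ofList n))
    else (none, none)
  | [] => (none, none)

def parse_task_and_node_type_py_alt (base_name : String) : Option String × Option String :=
  let parts := PySem.Chars.splitOn (PySem.Chars.upper base_name.toList) ['_']
  if parts.take 3 == ["QUANTILE".toList, "REGRESSION".toList, "FEAS".toList] then
    pvFinishB "QUANTILE_REGRESSION_FEAS" (parts.drop 3)
  else if parts.take 3 == ["QUANTILE".toList, "REGRESSION".toList, "INFEAS".toList] then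
    pvFinishB "QUANTILE_REGRESSION_INFEAS" (parts.drop 3)
  else if parts.headD [] == "FEASIBILITY".toList then   -- parts[0]: split() output is never empty
    pvFinishB "FEASIBILITY" (parts.drop 1)
  else (none, none)

-- ===== PRECONDITION & SPEC =====
def Spec_parse_task_and_node_type_py (base_name : String) (out : Option String × Option String) : Prop := out = parse_task_and_node_type_py_alt base_name
instance (base_name : String) (out : Option String × Option String) : Decidable (Spec_parse_task_and_node_type_py base_name out) := by unfold Spec_parse_task_and_node_type_py; infer_instance

-- ===== CLAIM (what is proved, stated in full; the proofs are below) =====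
def Claim_equal_parse_task_and_node_type_py : Prop := ∀ (base_name : String), Dom_parse_task_and_node_type_py base_name → Spec_parse_task_and_node_type_py base_name (parse_task_and_node_type_py base_name)

-- ===== LEMMAS AND PROOFS =====

-- reference single-char split and join, used only in the proofs
def pvSplitU : List Char → List (List Char)
  | [] => [[]]
  | c :: rest =>
    if c = '_' then [] :: pvSplitU rest
    else
      match pvSplitU rest with
      | t :: ts => (c :: t) :: ts
      | [] => [[c]]

def pvJoinU : List (List Char) → List Char
  | [] => []
  | [t] => t
  | t :: ts => t ++ '_' :: pvJoinU ts

def pvConsHd (p : List Char) : List (List Char) → List (List Char)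
  | t :: ts => (p ++ t) :: ts
  | [] => [p]

lemma pvSplitU_ne_nil (l : List Char) : pvSplitU l ≠ [] := by
  induction l with
  | nil => simp [pvSplitU]
  | cons c rest ih =>
    simp only [pvSplitU]
    split
    · simp
    · cases h : pvSplitU rest with
      | nil => simp
      | cons t ts => simp

lemma pvSplitU_cons_sep (rest : List Char) : pvSplitU ('_' :: rest) = [] :: pvSplitU rest := by
  simp [pvSplitU]

lemma pvSplitU_cons_ne (c : Char) (rest : List Char) (hc : c ≠ '_') (t : List Char)
    (ts : List (List Char)) (h : pvSplitU rest = t :: ts) :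
    pvSplitU (c :: rest) = (c :: t) :: ts := by
  unfold pvSplitU
  rw [if_neg hc, h]

lemma pvConsHd_nil (xs : List (List Char)) (hx : xs ≠ []) : pvConsHd [] xs = xs := by
  cases xs with
  | nil => exact absurd rfl hx
  | cons t ts => simp [pvConsHd]

lemma pvGo_spec (fuel : Nat) : ∀ (l cur : List Char) (accs : List (List Char)),
    l.length < fuel →
    PySem.Chars.splitOn.go ['_'] fuel l cur accs
      = accs.reverse ++ pvConsHd cur.reverse (pvSplitU l) := by
  induction fuel with
  | zero => intro l cur accs h; omega
  | succ fuel ih =>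
    intro l cur accs h
    cases l with
    | nil =>
      rw [PySem.Chars.splitOn.go]
      · simp [pvSplitU, pvConsHd]
      · omega
    | cons c rest =>
      rw [PySem.Chars.splitOn.go]
      obtain ⟨t, ts, hs⟩ := List.exists_cons_of_ne_nil (pvSplitU_ne_nil rest)
      by_cases hc : c = '_'
      · subst hc
        rw [if_pos (by simp [List.isPrefixOf])]
        rw [ih _ _ _ (by simpa using h)]
        rw [pvSplitU_cons_sep rest]
        simp [pvConsHd]
        rw [hs]
      · rw [if_neg (by simp [List.isPrefixOf]; exact fun he => hc he.symm)]
        rw [ih _ _ _ (by simpa using h)]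
        rw [pvSplitU_cons_ne c rest hc t ts hs, hs]
        simp [pvConsHd]

lemma pvSplitOn_eq (u : List Char) : PySem.Chars.splitOn u ['_'] = pvSplitU u := by
  rw [PySem.Chars.splitOn, pvGo_spec (u.length + 1) u [] [] (by omega)]
  simp [pvConsHd_nil _ (pvSplitU_ne_nil u)]

lemma pvSplitU_append (x y : List Char) :
    pvSplitU (x ++ '_' :: y) = pvSplitU x ++ pvSplitU y := by
  induction x with
  | nil => simp [pvSplitU]
  | cons c rest ih =>
    by_cases hc : c = '_'
    · simp [pvSplitU, hc, ih]
    · simp only [List.cons_append, pvSplitU, if_neg hc, ih]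
      cases h : pvSplitU rest with
      | nil => exact absurd h (pvSplitU_ne_nil rest)
      | cons t ts => simp

lemma pvSplitU_no_sep (x : List Char) (hx : '_' ∉ x) : pvSplitU x = [x] := by
  induction x with
  | nil => simp [pvSplitU]
  | cons c rest ih =>
    simp only [List.mem_cons, not_or] at hx
    simp [pvSplitU, Ne.symm hx.1, ih hx.2]

lemma pvJoinU_cons (t : List Char) (ts : List (List Char)) (h : ts ≠ []) :
    pvJoinU (t :: ts) = t ++ '_' :: pvJoinU ts := by
  cases ts with
  | nil => exact absurd rfl h
  | cons b l => rfl

lemma pvJoinU_splitU (y : List Char) : pvJoinU (pvSplitU y) = y := by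
  induction y with
  | nil => simp [pvSplitU, pvJoinU]
  | cons c rest ih =>
    by_cases hc : c = '_'
    · subst hc
      rw [pvSplitU_cons_sep rest, pvJoinU_cons [] _ (pvSplitU_ne_nil rest), ih]
      simp
    · obtain ⟨t, ts, hs⟩ := List.exists_cons_of_ne_nil (pvSplitU_ne_nil rest)
      rw [pvSplitU_cons_ne c rest hc t ts hs]
      rw [hs] at ih
      cases ts with
      | nil => simp_all [pvJoinU]
      | cons b l =>
        rw [pvJoinU_cons (c :: t) (b :: l) (by simp)]
        rw [pvJoinU_cons t (b :: l) (by simp)] at ih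
        simpa using ih

-- head-token characterisation of A's node test
lemma pvHead_token_iff (y n : List Char) (hn : '_' ∉ n) :
    ((n ++ ['_']) <+: y ∨ y = n) ↔ (pvSplitU y).head? = some n := by
  constructor
  · rintro (⟨z, hz⟩ | rfl)
    · subst hz
      rw [List.append_assoc]
      simp only [List.singleton_append]
      rw [pvSplitU_append, pvSplitU_no_sep n hn]
      simp
    · rw [pvSplitU_no_sep y hn]; simp
  · intro h
    cases hs : pvSplitU y with
    | nil => exact absurd hs (pvSplitU_ne_nil y)
    | cons t ts =>
      rw [hs] at h
      simp at h
      subst h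
      have hy := pvJoinU_splitU y
      rw [hs] at hy
      cases ts with
      | nil => right; simpa [pvJoinU] using hy.symm
      | cons b l =>
        left
        rw [pvJoinU_cons _ _ (by simp)] at hy
        exact ⟨pvJoinU (b :: l), by rw [← hy]; simp⟩

-- A's inner loop as a function of the head token of the (uppercased) remainder
lemma pvNodeLoopA_eq (r z : List Char) (hu : PySem.Chars.upper r = z) :
    pvNodeLoopA r pvNodesA =
      (if (pvSplitU z).headD [] = "WAYPOINTS".toList then some "WAYPOINTS"
       else if (pvSplitU z).headD [] = "RRT".toList then some "RRT"
       else if (pvSplitU z).headD [] = "LGP".toList then some "LGP"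
       else none) := by
  obtain ⟨n0, ts, hs⟩ := List.exists_cons_of_ne_nil (pvSplitU_ne_nil z)
  have key : ∀ n : List Char, '_' ∉ n →
      ((PySem.Chars.startswith z (n ++ ['_']) || (z == n)) = true ↔ n0 = n) := by
    intro n hn
    rw [Bool.or_eq_true, PySem.Chars.startswith_iff, beq_iff_eq, pvHead_token_iff z n hn, hs]
    simp
  rw [hs]
  simp only [pvNodeLoopA, pvNodesA, hu, List.headD_cons]
  by_cases h1 : n0 = "WAYPOINTS".toList
  · rw [if_pos ((key _ (by decide)).mpr h1), if_pos h1]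
  · rw [if_neg (fun hc => h1 ((key _ (by decide)).mp hc)), if_neg h1]
    by_cases h2 : n0 = "RRT".toList
    · rw [if_pos ((key _ (by decide)).mpr h2), if_pos h2]
    · rw [if_neg (fun hc => h2 ((key _ (by decide)).mp hc)), if_neg h2]
      by_cases h3 : n0 = "LGP".toList
      · rw [if_pos ((key _ (by decide)).mpr h3), if_pos h3]
      · rw [if_neg (fun hc => h3 ((key _ (by decide)).mp hc)), if_neg h3]


-- A's outer loop versus B's token tests, at the level of char lists
lemma pvMain (b : List Char) :
    pvTaskLoopA b pvTasksA =
      (let parts := pvSplitU (PySem.Chars.upper b)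
       if parts.take 3 == ["QUANTILE".toList, "REGRESSION".toList, "FEAS".toList] then
         pvFinishB "QUANTILE_REGRESSION_FEAS" (parts.drop 3)
       else if parts.take 3 == ["QUANTILE".toList, "REGRESSION".toList, "INFEAS".toList] then
         pvFinishB "QUANTILE_REGRESSION_INFEAS" (parts.drop 3)
       else if parts.headD [] == "FEASIBILITY".toList then
         pvFinishB "FEASIBILITY" (parts.drop 1)
       else (none, none)) := by
  set u := PySem.Chars.upper b with hu
  simp only [pvTaskLoopA, pvTasksA]
  by_cases hc1 : ("QUANTILE_REGRESSION_FEAS".toList ++ ['_']) <+: u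
  · -- task = QUANTILE_REGRESSION_FEAS
    have hp1 := hc1
    rw [if_pos (by rw [PySem.Chars.startswith_iff]; exact hc1)]
    obtain ⟨w, hw⟩ := hc1
    have hz : u = "QUANTILE_REGRESSION_FEAS".toList ++ '_' :: w := by rw [← hw]; simp
    have hsplit : pvSplitU u = "QUANTILE".toList :: "REGRESSION".toList :: "FEAS".toList :: pvSplitU w := by
      rw [hz, pvSplitU_append,
        show pvSplitU "QUANTILE_REGRESSION_FEAS".toList = ["QUANTILE".toList, "REGRESSION".toList, "FEAS".toList] from by decide]
      rfl
    have hrem : PySem.Chars.upper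
        (PySem.Chars.slice b (some ((PySem.Chars.len "QUANTILE_REGRESSION_FEAS".toList : Int) + 1)) none) = w := by
      rw [show ((PySem.Chars.len "QUANTILE_REGRESSION_FEAS".toList : Int) + 1) = ((25 : Nat) : Int) from by decide]
      rw [PySem.Chars.slice_eq_listSlice, PySem.List.slice_from_natCast]
      rw [show PySem.Chars.upper (b.drop 25) = (PySem.Chars.upper b).drop 25 from List.map_drop ..]
      rw [← hu, hz,
        show ("QUANTILE_REGRESSION_FEAS".toList ++ '_' :: w) = ("QUANTILE_REGRESSION_FEAS".toList ++ ['_']) ++ w from by simp,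
        show (25 : Nat) = ("QUANTILE_REGRESSION_FEAS".toList ++ ['_']).length from by decide,
        List.drop_left]
    rw [pvNodeLoopA_eq _ w hrem]
    simp only [hsplit, List.take_succ_cons, List.take_zero, List.drop_succ_cons, List.drop_zero, List.headD_cons]
    rw [if_pos (show (["QUANTILE".toList, "REGRESSION".toList, "FEAS".toList] == ["QUANTILE".toList, "REGRESSION".toList, "FEAS".toList]) = true from by decide)]
    obtain ⟨n0, ts, hsw⟩ := List.exists_cons_of_ne_nil (pvSplitU_ne_nil w)
    simp only [hsw, List.headD_cons]
    by_cases h1 : n0 = "WAYPOINTS".toList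
    · rw [if_pos h1]; simp [pvFinishB, h1]
    · rw [if_neg h1]
      by_cases h2 : n0 = "RRT".toList
      · rw [if_pos h2]; simp [pvFinishB, h2]
      · rw [if_neg h2]
        by_cases h3 : n0 = "LGP".toList
        · rw [if_pos h3]; simp [pvFinishB, h3]
        · rw [if_neg h3]
          have h12 : ¬ PySem.Chars.startswith u ("QUANTILE_REGRESSION_INFEAS".toList ++ ['_']) = true := by
            rw [PySem.Chars.startswith_iff]
            intro hp2
            rcases List.prefix_or_prefix_of_prefix hp1 hp2 with h | h <;> exact absurd h (by decide)
          have h13 : ¬ PySem.Chars.startswith u ("FEASIBILITY".toList ++ ['_']) = true := by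
            rw [PySem.Chars.startswith_iff]
            intro hp2
            rcases List.prefix_or_prefix_of_prefix hp1 hp2 with h | h <;> exact absurd h (by decide)
          rw [if_neg h12, if_neg h13]
          simp [pvFinishB]
          exact ⟨⟨by simpa using h1, by simpa using h2⟩, by simpa using h3⟩

  · rw [if_neg (by rw [PySem.Chars.startswith_iff]; exact hc1)]
    by_cases hc2 : ("QUANTILE_REGRESSION_INFEAS".toList ++ ['_']) <+: u
    · -- task = QUANTILE_REGRESSION_INFEAS
      have hp2 := hc2
      rw [if_pos (by rw [PySem.Chars.startswith_iff]; exact hc2)]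
      obtain ⟨w, hw⟩ := hc2
      have hz : u = "QUANTILE_REGRESSION_INFEAS".toList ++ '_' :: w := by rw [← hw]; simp
      have hsplit : pvSplitU u = "QUANTILE".toList :: "REGRESSION".toList :: "INFEAS".toList :: pvSplitU w := by
        rw [hz, pvSplitU_append,
          show pvSplitU "QUANTILE_REGRESSION_INFEAS".toList = ["QUANTILE".toList, "REGRESSION".toList, "INFEAS".toList] from by decide]
        rfl
      have hrem : PySem.Chars.upper
          (PySem.Chars.slice b (some ((PySem.Chars.len "QUANTILE_REGRESSION_INFEAS".toList : Int) + 1)) none) = w := by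
        rw [show ((PySem.Chars.len "QUANTILE_REGRESSION_INFEAS".toList : Int) + 1) = ((27 : Nat) : Int) from by decide]
        rw [PySem.Chars.slice_eq_listSlice, PySem.List.slice_from_natCast]
        rw [show PySem.Chars.upper (b.drop 27) = (PySem.Chars.upper b).drop 27 from List.map_drop ..]
        rw [← hu, hz,
          show ("QUANTILE_REGRESSION_INFEAS".toList ++ '_' :: w) = ("QUANTILE_REGRESSION_INFEAS".toList ++ ['_']) ++ w from by simp,
          show (27 : Nat) = ("QUANTILE_REGRESSION_INFEAS".toList ++ ['_']).length from by decide,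
          List.drop_left]
      rw [pvNodeLoopA_eq _ w hrem]
      simp only [hsplit, List.take_succ_cons, List.take_zero, List.drop_succ_cons, List.drop_zero, List.headD_cons]
      rw [if_neg (show ¬ (["QUANTILE".toList, "REGRESSION".toList, "INFEAS".toList] == ["QUANTILE".toList, "REGRESSION".toList, "FEAS".toList]) = true from by decide)]
      rw [if_pos (show (["QUANTILE".toList, "REGRESSION".toList, "INFEAS".toList] == ["QUANTILE".toList, "REGRESSION".toList, "INFEAS".toList]) = true from by decide)]
      obtain ⟨n0, ts, hsw⟩ := List.exists_cons_of_ne_nil (pvSplitU_ne_nil w)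
      simp only [hsw, List.headD_cons]
      by_cases h1 : n0 = "WAYPOINTS".toList
      · rw [if_pos h1]; simp [pvFinishB, h1]
      · rw [if_neg h1]
        by_cases h2 : n0 = "RRT".toList
        · rw [if_pos h2]; simp [pvFinishB, h2]
        · rw [if_neg h2]
          by_cases h3 : n0 = "LGP".toList
          · rw [if_pos h3]; simp [pvFinishB, h3]
          · rw [if_neg h3]
            have h23 : ¬ PySem.Chars.startswith u ("FEASIBILITY".toList ++ ['_']) = true := by
              rw [PySem.Chars.startswith_iff]
              intro hpx
              rcases List.prefix_or_prefix_of_prefix hp2 hpx with h | h <;> exact absurd h (by decide)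
            rw [if_neg h23]
            simp [pvFinishB]
            exact ⟨⟨by simpa using h1, by simpa using h2⟩, by simpa using h3⟩

    · rw [if_neg (by rw [PySem.Chars.startswith_iff]; exact hc2)]
      by_cases hc3 : ("FEASIBILITY".toList ++ ['_']) <+: u
      · -- task = FEASIBILITY
        rw [if_pos (by rw [PySem.Chars.startswith_iff]; exact hc3)]
        obtain ⟨w, hw⟩ := hc3
        have hz : u = "FEASIBILITY".toList ++ '_' :: w := by rw [← hw]; simp
        have hsplit : pvSplitU u = "FEASIBILITY".toList :: pvSplitU w := by
          rw [hz, pvSplitU_append,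
            show pvSplitU "FEASIBILITY".toList = ["FEASIBILITY".toList] from by decide]
          rfl
        have hrem : PySem.Chars.upper
            (PySem.Chars.slice b (some ((PySem.Chars.len "FEASIBILITY".toList : Int) + 1)) none) = w := by
          rw [show ((PySem.Chars.len "FEASIBILITY".toList : Int) + 1) = ((12 : Nat) : Int) from by decide]
          rw [PySem.Chars.slice_eq_listSlice, PySem.List.slice_from_natCast]
          rw [show PySem.Chars.upper (b.drop 12) = (PySem.Chars.upper b).drop 12 from List.map_drop ..]
          rw [← hu, hz,
            show ("FEASIBILITY".toList ++ '_' :: w) = ("FEASIBILITY".toList ++ ['_']) ++ w from by simp,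
            show (12 : Nat) = ("FEASIBILITY".toList ++ ['_']).length from by decide,
            List.drop_left]
        rw [pvNodeLoopA_eq _ w hrem]
        simp only [hsplit, List.take_succ_cons, List.drop_succ_cons, List.drop_zero, List.headD_cons]
        rw [if_neg (show ¬ (("FEASIBILITY".toList :: (pvSplitU w).take 2) == ["QUANTILE".toList, "REGRESSION".toList, "FEAS".toList]) = true from by simp)]
        rw [if_neg (show ¬ (("FEASIBILITY".toList :: (pvSplitU w).take 2) == ["QUANTILE".toList, "REGRESSION".toList, "INFEAS".toList]) = true from by simp)]
        rw [if_pos (show (("FEASIBILITY".toList == "FEASIBILITY".toList) : Bool) = true from by decide)]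
        obtain ⟨n0, ts, hsw⟩ := List.exists_cons_of_ne_nil (pvSplitU_ne_nil w)
        simp only [hsw, List.headD_cons]
        by_cases h1 : n0 = "WAYPOINTS".toList
        · rw [if_pos h1]; simp [pvFinishB, h1]
        · rw [if_neg h1]
          by_cases h2 : n0 = "RRT".toList
          · rw [if_pos h2]; simp [pvFinishB, h2]
          · rw [if_neg h2]
            by_cases h3 : n0 = "LGP".toList
            · rw [if_pos h3]; simp [pvFinishB, h3]
            · rw [if_neg h3]
              simp [pvFinishB]
              exact ⟨⟨by simpa using h1, by simpa using h2⟩, by simpa using h3⟩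

      · -- no task prefix matches: A returns (None, None)
        rw [if_neg (by rw [PySem.Chars.startswith_iff]; exact hc3)]
        by_cases hb1 : (pvSplitU u).take 3 = ["QUANTILE".toList, "REGRESSION".toList, "FEAS".toList]
        · have hparts : pvSplitU u =
              "QUANTILE".toList :: "REGRESSION".toList :: "FEAS".toList :: (pvSplitU u).drop 3 := by
            conv_lhs => rw [← List.take_append_drop 3 (pvSplitU u)]
            rw [hb1]; rfl
          cases hrest : (pvSplitU u).drop 3 with
          | nil =>
            rw [if_pos (by rw [hb1]; rfl)]
            simp [pvFinishB]
          | cons r0 rs =>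
            exfalso
            apply hc1
            refine ⟨pvJoinU (r0 :: rs), ?_⟩
            have hj := pvJoinU_splitU u
            rw [hparts, hrest] at hj
            rw [pvJoinU_cons _ _ (by simp), pvJoinU_cons _ _ (by simp),
              pvJoinU_cons _ _ (by simp)] at hj
            rw [← hj]
            simp
        · rw [if_neg (by simpa using hb1)]
          by_cases hb2 : (pvSplitU u).take 3 = ["QUANTILE".toList, "REGRESSION".toList, "INFEAS".toList]
          · have hparts : pvSplitU u =
                "QUANTILE".toList :: "REGRESSION".toList :: "INFEAS".toList :: (pvSplitU u).drop 3 := by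
              conv_lhs => rw [← List.take_append_drop 3 (pvSplitU u)]
              rw [hb2]; rfl
            cases hrest : (pvSplitU u).drop 3 with
            | nil =>
              rw [if_pos (by rw [hb2]; rfl)]
              simp [pvFinishB]
            | cons r0 rs =>
              exfalso
              apply hc2
              refine ⟨pvJoinU (r0 :: rs), ?_⟩
              have hj := pvJoinU_splitU u
              rw [hparts, hrest] at hj
              rw [pvJoinU_cons _ _ (by simp), pvJoinU_cons _ _ (by simp),
                pvJoinU_cons _ _ (by simp)] at hj
              rw [← hj]
              simp
          · rw [if_neg (by simpa using hb2)]
            by_cases hb3 : (pvSplitU u).headD [] = "FEASIBILITY".toList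
            · obtain ⟨h0, rest, hsp⟩ := List.exists_cons_of_ne_nil (pvSplitU_ne_nil u)
              rw [hsp] at hb3
              simp at hb3
              subst hb3
              cases rest with
              | nil =>
                rw [if_pos (by rw [hsp]; rfl)]
                simp [hsp, pvFinishB]
              | cons r0 rs =>
                exfalso
                apply hc3
                refine ⟨pvJoinU (r0 :: rs), ?_⟩
                have hj := pvJoinU_splitU u
                rw [hsp, pvJoinU_cons _ _ (by simp)] at hj
                rw [← hj]
                simp
            · rw [if_neg (by simpa using hb3)]

-- ===== VERDICT (by name: the statement is the Claim_ definition above) =====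
theorem parse_task_and_node_type_py_spec : Claim_equal_parse_task_and_node_type_py := by
  intro base _
  show pvTaskLoopA base.toList pvTasksA = parse_task_and_node_type_py_alt base
  unfold parse_task_and_node_type_py_alt
  rw [pvSplitOn_eq]
  exact pvMain base.toList
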